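-- pv_equiv track=rewrite | github.com/sam9s/racen-grest | chatbot_engine.py | format_context_from_docs
-- ===== SOURCE A (Python) =====
-- from typing import List, Optional, Tuple
--
-- def get_source_authority_level(source: str) -> tuple:
--     """
--     Assign authority level to sources. Lower number = higher authority.
--     Returns (authority_level, source_type_label).
--
--     Authority Hierarchy:
--     1. GREST official policy documents (warranty, refund, shipping policies)
--     2. Official FAQ page
--     3. Contact info and about pages
--     4. Custom knowledge base documents (curated by admin)
--     5. Product collection pages
--     6. Individual product pages (least authoritative - may have simplified info)
--     """
--     source_lower = source.lower()
--
--     # Level 1: Official policy documents (MOST AUTHORITATIVE)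
--     if any(x in source_lower for x in ['warranty_policy', 'grest_warranty', 'refund_policy', 'shipping_policy']):
--         return (1, "OFFICIAL POLICY - HIGHEST AUTHORITY")
--     if '/policies/' in source_lower or '/pages/warranty' in source_lower:
--         return (1, "OFFICIAL POLICY - HIGHEST AUTHORITY")
--
--     # Level 2: FAQ page (official answers)
--     if '/pages/faq' in source_lower or 'faqs' in source_lower:
--         return (2, "OFFICIAL FAQ")
--
--     # Level 3: Contact and about pages
--     if any(x in source_lower for x in ['contact', 'about', 'grest_contact']):
--         return (3, "OFFICIAL INFO")
--
--     # Level 4: Curated knowledge base docs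
--     if source_lower.endswith('.txt') and 'grest_' in source_lower:
--         return (4, "CURATED DOCUMENT")
--
--     # Level 5: Collection pages
--     if '/collections/' in source_lower:
--         return (5, "PRODUCT COLLECTION")
--
--     # Level 6: Individual product pages (LEAST AUTHORITATIVE for policies)
--     if '/products/' in source_lower:
--         return (6, "PRODUCT PAGE - may contain simplified info")
--
--     # Default: Unknown source
--     return (7, "GENERAL INFO")
--
-- def format_context_from_docs(documents: List[dict]) -> str:
--     """
--     Format retrieved documents into context for the LLM.
--     Aggregates chunks by source URL and sorts by authority level.
--     Higher authority sources appear first with clear labels.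
--     """
--     if not documents:
--         return "No relevant information found in the knowledge base."
--
--     # Aggregate chunks by source URL with authority info
--     source_data = {}
--     for doc in documents:
--         source = doc.get("source", "Unknown source")
--         content = doc.get("content", "")
--
--         if source not in source_data:
--             authority_level, authority_label = get_source_authority_level(source)
--             source_data[source] = {
--                 'contents': [],
--                 'authority_level': authority_level,
--                 'authority_label': authority_label
--             }
--         source_data[source]['contents'].append(content)
--
--     # Sort by authority level (lower = more authoritative)
--     sorted_sources = sorted(source_data.items(), key=lambda x: x[1]['authority_level'])
--
--     # Format with authority labels
--     context_parts = []
--     for i, (source, data) in enumerate(sorted_sources, 1):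
--         combined_content = "\n\n".join(data['contents'])
--         authority_label = data['authority_label']
--         context_parts.append(f"[Source {i} - {authority_label}: {source}]\n{combined_content}")
--
--     return "\n\n---\n\n".join(context_parts)
-- ===== SOURCE B (Python) =====
-- def get_source_authority_level(source: str) -> tuple:
--     source_lower = source.lower()
--     if any(x in source_lower for x in ['warranty_policy', 'grest_warranty', 'refund_policy', 'shipping_policy']):
--         return (1, "OFFICIAL POLICY - HIGHEST AUTHORITY")
--     if '/policies/' in source_lower or '/pages/warranty' in source_lower:
--         return (1, "OFFICIAL POLICY - HIGHEST AUTHORITY")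
--     if '/pages/faq' in source_lower or 'faqs' in source_lower:
--         return (2, "OFFICIAL FAQ")
--     if any(x in source_lower for x in ['contact', 'about', 'grest_contact']):
--         return (3, "OFFICIAL INFO")
--     if source_lower.endswith('.txt') and 'grest_' in source_lower:
--         return (4, "CURATED DOCUMENT")
--     if '/collections/' in source_lower:
--         return (5, "PRODUCT COLLECTION")
--     if '/products/' in source_lower:
--         return (6, "PRODUCT PAGE - may contain simplified info")
--     return (7, "GENERAL INFO")
--
--
-- def format_context_from_docs(documents):
--     if not documents:
--         return "No relevant information found in the knowledge base."
--
--     # Group chunk contents by source (first-seen order).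
--     grouped = {}
--     for doc in documents:
--         grouped.setdefault(doc.get("source", "Unknown source"), []).append(doc.get("content", ""))
--
--     # Bucket pass per authority level (1..7) instead of sorting: emitting the
--     # groups level by level, in first-seen order within a level, reproduces the
--     # stable sort by authority level.
--     parts = []
--     for level in range(1, 8):
--         for source, contents in grouped.items():
--             lvl, label = get_source_authority_level(source)
--             if lvl == level:
--                 parts.append(f"[Source {len(parts) + 1} - {label}: {source}]\n" + "\n\n".join(contents))
--
--     return "\n\n---\n\n".join(parts)
-- ===== Notes on version B (the rewrite author's own statement) =====
-- stated objective: alternative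
-- what changed: B groups contents per source with a single setdefault dict (no stored authority data), then replaces A's sorted()-by-authority-level with seven bucket passes over the groups in insertion order (a counting/bucket emission that reproduces the stable sort), computing each label on the fly and numbering parts by len(parts)+1 instead of enumerate.
import Mathlib
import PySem

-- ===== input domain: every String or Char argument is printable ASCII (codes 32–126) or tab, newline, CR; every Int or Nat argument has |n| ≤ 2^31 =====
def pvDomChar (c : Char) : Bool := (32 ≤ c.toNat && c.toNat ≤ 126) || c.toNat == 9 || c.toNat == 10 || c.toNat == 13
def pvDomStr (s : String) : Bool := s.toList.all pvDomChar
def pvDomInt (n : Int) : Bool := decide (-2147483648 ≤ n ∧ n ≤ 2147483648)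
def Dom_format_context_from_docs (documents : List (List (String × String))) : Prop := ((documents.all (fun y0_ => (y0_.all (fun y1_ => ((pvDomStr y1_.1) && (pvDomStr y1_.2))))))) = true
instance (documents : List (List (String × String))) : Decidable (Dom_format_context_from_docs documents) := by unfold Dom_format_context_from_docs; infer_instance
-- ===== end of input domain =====

-- B replaces A's sorted() over the aggregated sources by seven per-authority-level bucket passes
-- over the grouped dict (objective: alternative; the aggregation and formatting are restructured too).

-- ===== PORT A =====
-- shared helper: port of get_source_authority_level (identical in Source A and Source B)
def pvAuth (source : String) : Int × String :=
  let source_lower := PySem.Str.lower source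
  if ["warranty_policy", "grest_warranty", "refund_policy", "shipping_policy"].any
      (fun x => PySem.Str.isIn x source_lower) then
    (1, "OFFICIAL POLICY - HIGHEST AUTHORITY")
  else if PySem.Str.isIn "/policies/" source_lower || PySem.Str.isIn "/pages/warranty" source_lower then
    (1, "OFFICIAL POLICY - HIGHEST AUTHORITY")
  else if PySem.Str.isIn "/pages/faq" source_lower || PySem.Str.isIn "faqs" source_lower then
    (2, "OFFICIAL FAQ")
  else if ["contact", "about", "grest_contact"].any (fun x => PySem.Str.isIn x source_lower) then
    (3, "OFFICIAL INFO")
  else if PySem.Str.endswith source_lower ".txt" && PySem.Str.isIn "grest_" source_lower then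
    (4, "CURATED DOCUMENT")
  else if PySem.Str.isIn "/collections/" source_lower then
    (5, "PRODUCT COLLECTION")
  else if PySem.Str.isIn "/products/" source_lower then
    (6, "PRODUCT PAGE - may contain simplified info")
  else
    (7, "GENERAL INFO")

-- shared helper: doc.get("source", "Unknown source") / doc.get("content", "")
def pvSrc (doc : List (String × String)) : String :=
  PySem.Dict.getD (PySem.Dict.mk doc) "source" "Unknown source"
def pvContent (doc : List (String × String)) : String :=
  PySem.Dict.getD (PySem.Dict.mk doc) "content" ""

-- A's aggregation loop body: dict source -> {'contents', 'authority_level', 'authority_label'}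
-- ported as source -> (contents, level, label)
def pvStepA (sd : PySem.Dict String (List String × Int × String)) (doc : List (String × String)) :
    PySem.Dict String (List String × Int × String) :=
  let source := pvSrc doc
  let content := pvContent doc
  let sd1 := if sd.contains source then sd
             else sd.insert source ([], (pvAuth source).1, (pvAuth source).2)
  sd1.modify source ([], 0, "") (fun v => (v.1 ++ [content], v.2.1, v.2.2))

-- A's f-string for one enumerated (i, (source, data)) entry
def pvFmtA (p : Int × (String × (List String × Int × String))) : String :=
  PySem.Str.join "" ["[Source ", PySem.Int.toStr p.1, " - ", p.2.2.2.2, ": ", p.2.1, "]\n",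
    PySem.Str.join "\n\n" p.2.2.1]

def format_context_from_docs (documents : List (List (String × String))) : String :=
  if documents.isEmpty then "No relevant information found in the knowledge base."
  else
    let source_data := documents.foldl pvStepA PySem.Dict.empty
    let sorted_sources := PySem.List.sorted source_data.items (fun x => x.2.2.1) false
    let context_parts :=
      (PySem.List.enumerate sorted_sources 1).foldl (fun parts p => parts ++ [pvFmtA p]) []
    PySem.Str.join "\n\n---\n\n" context_parts

-- ===== PORT B =====
-- B's grouping loop body: grouped.setdefault(source, []).append(content)
def pvStepB (g : PySem.Dict String (List String)) (doc : List (String × String)) :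
    PySem.Dict String (List String) :=
  PySem.Dict.modify g (pvSrc doc) [] (fun cs => cs ++ [pvContent doc])

def format_context_from_docs_alt (documents : List (List (String × String))) : String :=
  if documents.isEmpty then "No relevant information found in the knowledge base."
  else
    let grouped := documents.foldl pvStepB PySem.Dict.empty
    let parts := (PySem.List.pyRange 1 8 1).foldl (fun parts level =>
      grouped.items.foldl (fun parts p =>
        if (pvAuth p.1).1 == level then
          parts ++ [PySem.Str.join "" ["[Source ", PySem.Int.toStr ((parts.length : Int) + 1),
            " - ", (pvAuth p.1).2, ": ", p.1, "]\n", PySem.Str.join "\n\n" p.2]]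
        else parts) parts) []
    PySem.Str.join "\n\n---\n\n" parts

-- ===== PRECONDITION & SPEC =====
def Spec_format_context_from_docs (documents : List (List (String × String))) (out : String) : Prop := out = format_context_from_docs_alt documents
instance (documents : List (List (String × String))) (out : String) : Decidable (Spec_format_context_from_docs documents out) := by unfold Spec_format_context_from_docs; infer_instance

-- ===== CLAIM (what is proved, stated in full; the proofs are below) =====
def Claim_equal_format_context_from_docs : Prop := ∀ (documents : List (List (String × String))), Dom_format_context_from_docs documents → Spec_format_context_from_docs documents (format_context_from_docs documents)

-- ===== LEMMAS AND PROOFS =====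

-- the value A stores for a source is B's contents list decorated with the (recomputable) authority info
def pvF (p : String × List String) : String × (List String × Int × String) :=
  (p.1, (p.2, (pvAuth p.1).1, (pvAuth p.1).2))

-- B's formatted part for group p at position i
def pvFmt (i : Int) (p : String × List String) : String :=
  PySem.Str.join "" ["[Source ", PySem.Int.toStr i, " - ", (pvAuth p.1).2, ": ", p.1, "]\n",
    PySem.Str.join "\n\n" p.2]

theorem pvAuth_bounds (s : String) : 1 ≤ (pvAuth s).1 ∧ (pvAuth s).1 ≤ 7 := by
  unfold pvAuth
  dsimp only
  split_ifs <;> norm_num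

theorem pvF_fst (p : String × List String) : (pvF p).1 = p.1 := rfl

theorem pv_keys_eq {d : PySem.Dict String (List String × Int × String)}
    {g : PySem.Dict String (List String)} (h : d.items = g.items.map pvF) :
    d.keys = g.keys := by
  simp only [PySem.Dict.keys, h, List.map_map]
  rfl

theorem pv_contains_eq {d : PySem.Dict String (List String × Int × String)}
    {g : PySem.Dict String (List String)} (h : d.items = g.items.map pvF) (s : String) :
    d.contains s = g.contains s := by
  rw [PySem.Dict.contains_eq_decide_mem_keys, PySem.Dict.contains_eq_decide_mem_keys,
    pv_keys_eq h]

theorem pvStep_rel (doc : List (String × String))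
    (d : PySem.Dict String (List String × Int × String)) (g : PySem.Dict String (List String))
    (h : d.items = g.items.map pvF) (hnd : g.keys.Nodup) :
    (pvStepA d doc).items = (pvStepB g doc).items.map pvF ∧ (pvStepB g doc).keys.Nodup := by
  have hdnd : d.keys.Nodup := by rw [pv_keys_eq h]; exact hnd
  unfold pvStepA pvStepB
  set s := pvSrc doc with hsdef
  set c := pvContent doc with hcdef
  by_cases hg : g.contains s = true
  · have hdc : d.contains s = true := by rw [pv_contains_eq h]; exact hg
    obtain ⟨v, hv⟩ : ∃ v, g.get? s = some v := by
      have h1 := PySem.Dict.contains_eq_isSome_get? g s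
      rw [hg] at h1
      exact Option.isSome_iff_exists.mp h1.symm
    have hvm : (s, v) ∈ g.items := PySem.Dict.mem_items_of_get?_eq_some _ hv
    have hgD : g.getD s [] = v := PySem.Dict.getD_of_get?_eq_some _ _ hv
    have hdm : (s, (v, (pvAuth s).1, (pvAuth s).2)) ∈ d.items := by
      rw [h]
      exact List.mem_map_of_mem hvm
    have hdD : d.getD s ([], 0, "") = (v, (pvAuth s).1, (pvAuth s).2) :=
      PySem.Dict.getD_of_mem_items _ hdm hdnd _
    simp only [hdc, if_true]
    unfold PySem.Dict.modify
    rw [hdD, hgD]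
    dsimp only
    constructor
    · rw [PySem.Dict.items_insert_of_contains _ _ hdc, PySem.Dict.items_insert_of_contains _ _ hg, h,
        List.map_map, List.map_map]
      apply List.map_congr_left
      intro p _
      by_cases hp : p.1 = s
      · simp [pvF, hp]
      · simp [pvF, hp]
    · have hkeys : (g.insert s (v ++ [c])).keys = g.keys := by
        simp only [PySem.Dict.keys, PySem.Dict.items_insert_of_contains _ _ hg, List.map_map]
        apply List.map_congr_left
        intro p _
        by_cases hp : p.1 = s
        · simp [hp]
        · simp [hp]
      rw [hkeys]
      exact hnd
  · have hgf : g.contains s = false := by revert hg; cases g.contains s <;> simp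
    have hdf : d.contains s = false := by rw [pv_contains_eq h]; exact hgf
    have hsng : s ∉ g.keys := by
      rw [PySem.Dict.contains_eq_decide_mem_keys] at hgf
      simpa using hgf
    have hsnd : s ∉ d.keys := by rw [pv_keys_eq h]; exact hsng
    simp only [hdf, Bool.false_eq_true, if_false]
    have hit1 : (d.insert s ([], (pvAuth s).1, (pvAuth s).2)).items
        = d.items ++ [(s, ([], (pvAuth s).1, (pvAuth s).2))] :=
      PySem.Dict.items_insert_of_not_contains _ _ hdf
    have hk1 : (d.insert s ([], (pvAuth s).1, (pvAuth s).2)).keys = d.keys ++ [s] := by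
      simp [PySem.Dict.keys, hit1]
    have hnd1 : (d.insert s ([], (pvAuth s).1, (pvAuth s).2)).keys.Nodup := by
      rw [hk1]
      simp [List.nodup_append, hdnd]
      exact fun a ha he => hsnd (he ▸ ha)
    have hc1 : (d.insert s ([], (pvAuth s).1, (pvAuth s).2)).contains s = true := by
      rw [PySem.Dict.contains_eq_decide_mem_keys, hk1]
      simp
    have hgd1 : (d.insert s ([], (pvAuth s).1, (pvAuth s).2)).getD s ([], 0, "")
        = ([], (pvAuth s).1, (pvAuth s).2) :=
      PySem.Dict.getD_of_mem_items _ (by rw [hit1]; simp) hnd1 _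
    unfold PySem.Dict.modify
    rw [hgd1, PySem.Dict.getD_of_not_contains _ _ hgf]
    dsimp only
    simp only [List.nil_append]
    constructor
    · rw [PySem.Dict.items_insert_of_contains _ _ hc1, hit1,
        PySem.Dict.items_insert_of_not_contains _ _ hgf, List.map_append, List.map_append, h]
      congr 1
      · rw [List.map_map]
        apply List.map_congr_left
        intro p hp
        have hmem : p.1 ∈ g.keys := by
          simp only [PySem.Dict.keys]
          exact List.mem_map_of_mem hp
        have hne : (pvF p).1 ≠ s := by
          rw [pvF_fst]
          exact fun he => hsng (he ▸ hmem)
        simp [hne]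
      · simp [pvF]
    · have hkB : (g.insert s [c]).keys = g.keys ++ [s] := by
        simp [PySem.Dict.keys, PySem.Dict.items_insert_of_not_contains _ _ hgf]
      rw [hkB]
      simp [List.nodup_append, hnd]
      exact fun a ha he => hsng (he ▸ ha)

theorem pvFold_rel (docs : List (List (String × String)))
    (d : PySem.Dict String (List String × Int × String)) (g : PySem.Dict String (List String))
    (h : d.items = g.items.map pvF) (hnd : g.keys.Nodup) :
    (docs.foldl pvStepA d).items = (docs.foldl pvStepB g).items.map pvF := by
  induction docs generalizing d g with
  | nil => simpa using h
  | cons doc docs ih =>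
    obtain ⟨h1, h2⟩ := pvStep_rel doc d g h hnd
    exact ih _ _ h1 h2

-- insertBy passes over a block it does not go before
theorem pv_insertBy_append {α : Type} (before : α → α → Bool) (x : α) (l1 l2 : List α)
    (h : ∀ y ∈ l1, before x y = false) :
    PySem.List.insertBy before x (l1 ++ l2) = l1 ++ PySem.List.insertBy before x l2 := by
  induction l1 with
  | nil => simp
  | cons y l1 ih =>
    simp only [List.cons_append, PySem.List.insertBy, h y (by simp)]
    simp only [Bool.false_eq_true, if_false, List.cons.injEq, true_and]
    exact ih (fun z hz => h z (by simp [hz]))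

-- insertBy goes before everything it is before
theorem pv_insertBy_front {α : Type} (before : α → α → Bool) (x : α) (l : List α)
    (h : ∀ y ∈ l, before x y = true) :
    PySem.List.insertBy before x l = x :: l := by
  cases l with
  | nil => rfl
  | cons y l => simp [PySem.List.insertBy, h y (by simp)]

theorem pv_flatMap_congr {α β : Type} {l : List α} {f g : α → List β}
    (h : ∀ a ∈ l, f a = g a) : l.flatMap f = l.flatMap g := by
  induction l with
  | nil => rfl
  | cons a l ih =>
    simp only [List.flatMap_cons, h a (by simp), ih (fun b hb => h b (by simp [hb]))]

-- inserting x into concatenated level buckets appends it to the end of its own bucket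
theorem pv_ins_buckets {α : Type} (key : α → Int) (x : α) (xs : List α) (ks : List Int)
    (hs : ks.Pairwise (· < ·)) (hm : key x ∈ ks) :
    PySem.List.insertBy (fun a b => decide (key a < key b)) x
      (ks.flatMap (fun k => xs.filter (fun a => key a == k)))
    = ks.flatMap (fun k => (xs ++ [x]).filter (fun a => key a == k)) := by
  induction ks with
  | nil => simp at hm
  | cons k ks ih =>
    rw [List.pairwise_cons] at hs
    obtain ⟨hlt, hs'⟩ := hs
    simp only [List.flatMap_cons]
    by_cases hk : key x = k
    · rw [pv_insertBy_append _ _ _ _ (by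
        intro y hy
        have hyk : key y = k := by simpa using (List.mem_filter.mp hy).2
        simp only [decide_eq_false_iff_not, hyk, hk]
        omega)]
      rw [pv_insertBy_front _ _ _ (by
        intro y hy
        obtain ⟨k', hk', hy'⟩ := List.mem_flatMap.mp hy
        have hyk : key y = k' := by simpa using (List.mem_filter.mp hy').2
        simp only [decide_eq_true_eq, hyk, hk]
        exact hlt k' hk')]
      have h1 : (xs ++ [x]).filter (fun a => key a == k) = xs.filter (fun a => key a == k) ++ [x] := by
        simp [List.filter_append, hk]
      have h2 : ks.flatMap (fun k' => (xs ++ [x]).filter (fun a => key a == k')) =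
          ks.flatMap (fun k' => xs.filter (fun a => key a == k')) := by
        apply pv_flatMap_congr
        intro k' hk'
        have hne : (key x == k') = false := by
          have := hlt k' hk'
          simp only [beq_eq_false_iff_ne, ne_eq, hk]
          omega
        simp [List.filter_append, hne]
      rw [h1, h2]
      simp
    · have hm' : key x ∈ ks := by
        rcases List.mem_cons.mp hm with h' | h'
        · exact absurd h' hk
        · exact h'
      rw [pv_insertBy_append _ _ _ _ (by
        intro y hy
        have hyk : key y = k := by simpa using (List.mem_filter.mp hy).2
        have : k < key x := hlt _ hm'
        simp only [decide_eq_false_iff_not, hyk]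
        omega)]
      rw [ih hs' hm']
      have hfk : (xs ++ [x]).filter (fun a => key a == k) = xs.filter (fun a => key a == k) := by
        have hne : (key x == k) = false := by simp [hk]
        simp [List.filter_append, hne]
      rw [hfk]

-- A's stable sort by authority level IS the concatenation of the seven level buckets
theorem pv_bucket {α : Type} (key : α → Int) (xs : List α)
    (h : ∀ x ∈ xs, 1 ≤ key x ∧ key x ≤ 7) :
    PySem.List.sorted xs key false
    = (PySem.List.pyRange 1 8 1).flatMap (fun k => xs.filter (fun a => key a == k)) := by
  induction xs using List.reverseRecOn with
  | nil => simp [PySem.List.sorted_eq_foldl_insertBy]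
  | append_singleton xs x ih =>
    rw [PySem.List.sorted_eq_foldl_insertBy, List.foldl_append, List.foldl_cons, List.foldl_nil,
      ← PySem.List.sorted_eq_foldl_insertBy]
    rw [ih (fun y hy => h y (by simp [hy]))]
    exact pv_ins_buckets key x xs _ (PySem.List.pairwise_lt_pyRange_one 1 8)
      (by
        have hx := h x (by simp)
        rw [PySem.List.mem_pyRange_one]
        omega)

theorem pv_enumerate_map {α β : Type} (f : α → β) (l : List α) (s : Int) :
    PySem.List.enumerate (l.map f) s = (PySem.List.enumerate l s).map (fun q => (q.1, f q.2)) := by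
  induction l generalizing s with
  | nil => rfl
  | cons x l ih => simp [PySem.List.enumerate_cons, ih]

theorem pv_foldl_filter_if {α β : Type} (l : List α) (pr : α → Bool)
    (gf : List β → α → List β) (acc : List β) :
    l.foldl (fun acc x => if pr x then gf acc x else acc) acc = (l.filter pr).foldl gf acc := by
  induction l generalizing acc with
  | nil => rfl
  | cons x l ih =>
    by_cases hx : pr x <;> simp [hx, ih]

theorem pv_foldl_app_enum (L : List (String × List String)) (acc : List String) :
    L.foldl (fun parts p => parts ++ [pvFmt ((parts.length : Int) + 1) p]) acc
    = acc ++ (PySem.List.enumerate L ((acc.length : Int) + 1)).map (fun q => pvFmt q.1 q.2) := by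
  induction L generalizing acc with
  | nil => simp [PySem.List.enumerate]
  | cons p L ih =>
    simp only [List.foldl_cons, PySem.List.enumerate_cons, List.map_cons]
    rw [ih]
    have hlen : (((acc ++ [pvFmt ((acc.length : Int) + 1) p]).length : Int) + 1)
        = ((acc.length : Int) + 1) + 1 := by
      simp only [List.length_append, List.length_cons, List.length_nil]
      push_cast
      ring
    rw [hlen]
    simp

-- B's nested bucket loops, flattened to one indexed pass over the bucket concatenation
theorem pvB_parts (g : PySem.Dict String (List String)) :
    (PySem.List.pyRange 1 8 1).foldl (fun parts level =>
      g.items.foldl (fun parts p =>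
        if (pvAuth p.1).1 == level then
          parts ++ [PySem.Str.join "" ["[Source ", PySem.Int.toStr ((parts.length : Int) + 1),
            " - ", (pvAuth p.1).2, ": ", p.1, "]\n", PySem.Str.join "\n\n" p.2]]
        else parts) parts) []
    = ((PySem.List.pyRange 1 8 1).flatMap (fun k => g.items.filter (fun p => (pvAuth p.1).1 == k))).foldl
        (fun parts p => parts ++ [pvFmt ((parts.length : Int) + 1) p]) [] := by
  rw [List.foldl_flatMap]
  congr 1
  funext parts level
  exact pv_foldl_filter_if g.items (fun p => (pvAuth p.1).1 == level)
    (fun parts p => parts ++ [pvFmt ((parts.length : Int) + 1) p]) parts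

set_option maxHeartbeats 1000000 in
theorem pv_main (documents : List (List (String × String))) (hne : documents.isEmpty = false) :
    format_context_from_docs documents = format_context_from_docs_alt documents := by
  unfold format_context_from_docs format_context_from_docs_alt
  simp only [hne, Bool.false_eq_true, if_false]
  set g := documents.foldl pvStepB PySem.Dict.empty with hgdef
  have hitems : (documents.foldl pvStepA PySem.Dict.empty).items = g.items.map pvF :=
    pvFold_rel documents _ _ rfl (by simp [PySem.Dict.keys_empty])
  rw [hitems]
  have hb : ∀ q ∈ g.items.map pvF, 1 ≤ q.2.2.1 ∧ q.2.2.1 ≤ 7 := by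
    intro q hq
    obtain ⟨p, _, rfl⟩ := List.mem_map.mp hq
    exact pvAuth_bounds p.1
  rw [pv_bucket (fun q => q.2.2.1) (g.items.map pvF) hb]
  have hfil : ∀ k : Int, (g.items.map pvF).filter (fun q => q.2.2.1 == k)
      = (g.items.filter (fun p => (pvAuth p.1).1 == k)).map pvF := by
    intro k
    rw [List.filter_map]
    rfl
  simp only [hfil]
  rw [← List.map_flatMap]
  rw [pv_enumerate_map]
  rw [PySem.List.foldl_append_singleton_eq_map]
  rw [pvB_parts, pv_foldl_app_enum]
  simp only [List.nil_append, List.length_nil, Nat.cast_zero, zero_add, List.map_map]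
  congr 1

-- ===== VERDICT (by name: the statement is the Claim_ definition above) =====
theorem format_context_from_docs_spec : Claim_equal_format_context_from_docs := by
  intro documents _
  unfold Spec_format_context_from_docs
  cases hE : documents.isEmpty with
  | false => exact pv_main documents hE
  | true =>
    unfold format_context_from_docs format_context_from_docs_alt
    simp [hE]
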